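-- pv_equiv track=rewrite | github.com/EmmanuelOnyekachi21/alx-interview | 0x0A-primegame/0-prime_game.py | pick_num
-- ===== SOURCE A (Python) =====
-- def is_prime(n: int) -> bool:
--     """Checks if an integer is prime"""
--     if n == 1:
--         return False
--     if n == 2:
--         return True
--     for i in range(2, (n//2 + 1)):
--         if n % i == 0:
--             return False
--     return True
--
-- def pick_num(game_num: list, n: int) -> list:
--     """Picks a prime number and it's multiples"""
--     picked_nums = []
--     for num in game_num:
--         if is_prime(num):
--             for multiplier in range(1, n + 1):
--                 multiple = num * multiplier
--                 if multiple > n: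
--                     break
--                 if multiple in game_num:
--                     picked_nums.append(multiple)
--             break
--     return picked_nums
-- ===== SOURCE B (Python) =====
-- def _passes(v: int) -> bool:
--     """1 is not prime; otherwise trial division bounded by sqrt(v)."""
--     if v == 1:
--         return False
--     i = 2
--     while i * i <= v:
--         if v % i == 0:
--             return False
--         i += 1
--     return True
--
--
-- def pick_num(game_num: list, n: int) -> list:
--     """Picks a prime number and it's multiples"""
--     members = set(game_num)
--     for num in game_num:
--         if _passes(num):
--             picked = []
--             for k in range(1, n + 1):
--                 m = num * k
--                 if m > n:
--                     break
--                 if m in members: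
--                     picked.append(m)
--             return picked
--     return []
-- ===== Notes on version B (the rewrite author's own statement) =====
-- stated objective: faster
-- what changed: B replaces A's O(v) trial division up to v//2 with a sqrt-bounded while-loop test and builds a set of the list once so each multiple is checked in O(1) instead of scanning the list, returning from inside the scan instead of break-then-fallthrough.
import Mathlib
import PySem

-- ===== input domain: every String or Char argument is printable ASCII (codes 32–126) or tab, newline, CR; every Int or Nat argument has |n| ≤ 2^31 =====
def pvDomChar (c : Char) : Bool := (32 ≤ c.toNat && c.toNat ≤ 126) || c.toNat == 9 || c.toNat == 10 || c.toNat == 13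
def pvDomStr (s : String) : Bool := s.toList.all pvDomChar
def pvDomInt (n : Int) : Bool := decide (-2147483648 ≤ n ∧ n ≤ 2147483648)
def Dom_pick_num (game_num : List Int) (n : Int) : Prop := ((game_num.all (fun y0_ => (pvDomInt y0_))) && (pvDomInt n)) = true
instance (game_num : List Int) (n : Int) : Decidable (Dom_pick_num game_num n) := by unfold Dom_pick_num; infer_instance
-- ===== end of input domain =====

-- B replaces A's trial division bounded by v//2 with a sqrt-bounded one and
-- scans the multiples against a set built once instead of the list; same value.

-- ===== PORT A =====
def is_prime (nn : Int) : Bool :=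
  if nn == 1 then false
  else if nn == 2 then true
  else if (PySem.List.pyRange 2 (PySem.Int.floordiv nn 2 + 1) 1).any
          (fun i => PySem.Int.mod nn i == 0) then false
  else true

def pickA_inner (game_num : List Int) (n num : Int) : List Int → List Int
  | [] => []
  | k :: ks =>
    let multiple := num * k
    if multiple > n then []
    else if game_num.contains multiple then multiple :: pickA_inner game_num n num ks
    else pickA_inner game_num n num ks

def pickA_outer (game_num : List Int) (n : Int) : List Int → List Int
  | [] => []
  | num :: rest =>
    if is_prime num then pickA_inner game_num n num (PySem.List.pyRange 1 (n + 1) 1)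
    else pickA_outer game_num n rest

def pick_num (game_num : List Int) (n : Int) : List Int :=
  pickA_outer game_num n game_num

-- ===== PORT B =====
def pvTrial (v : Int) (i : Int) : Bool :=
  if _h : i * i ≤ v then
    (if PySem.Int.mod v i == 0 then false else pvTrial v (i + 1))
  else true
termination_by (v + 1 - i).toNat
decreasing_by
  have h2 : 0 < v + 1 - i := by nlinarith [mul_self_nonneg (i - 1)]
  omega

def pvPasses (v : Int) : Bool :=
  if v == 1 then false else pvTrial v 2

def pickB_inner (members : PySem.Set Int) (n num : Int) : List Int → List Int
  | [] => []
  | k :: ks =>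
    let m := num * k
    if m > n then []
    else if PySem.Set.contains members m then m :: pickB_inner members n num ks
    else pickB_inner members n num ks

def pickB_scan (members : PySem.Set Int) (n : Int) : List Int → List Int
  | [] => []
  | num :: rest =>
    if pvPasses num then pickB_inner members n num (PySem.List.pyRange 1 (n + 1) 1)
    else pickB_scan members n rest

def pick_num_alt (game_num : List Int) (n : Int) : List Int :=
  pickB_scan (PySem.Set.ofList game_num) n game_num

-- ===== PRECONDITION & SPEC =====
def Spec_pick_num (game_num : List Int) (n : Int) (out : List Int) : Prop := out = pick_num_alt game_num n
instance (game_num : List Int) (n : Int) (out : List Int) : Decidable (Spec_pick_num game_num n out) := by unfold Spec_pick_num; infer_instance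

-- ===== CLAIM (what is proved, stated in full; the proofs are below) =====
def Claim_equal_pick_num : Prop := ∀ (game_num : List Int) (n : Int), Dom_pick_num game_num n → Spec_pick_num game_num n (pick_num game_num n)

-- ===== LEMMAS AND PROOFS =====

theorem pvTrial_eq_true_iff (v i : Int) (hi : 1 ≤ i) :
    pvTrial v i = true ↔ ∀ j, i ≤ j → j * j ≤ v → PySem.Int.mod v j ≠ 0 := by
  induction i using pvTrial.induct v with
  | case1 i h hm =>
    rw [pvTrial, dif_pos h, if_pos hm]
    refine iff_of_false (by simp) ?_
    intro hall
    exact hall i le_rfl h (by simpa using hm)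
  | case2 i h hm ih =>
    rw [pvTrial, dif_pos h, if_neg hm]
    rw [ih (by omega)]
    constructor
    · intro hall j hij hjv
      rcases eq_or_lt_of_le hij with rfl | hlt
      · simpa using hm
      · exact hall j (by omega) hjv
    · intro hall j hij hjv
      exact hall j (by omega) hjv
  | case3 i h =>
    rw [pvTrial, dif_neg h]
    refine iff_of_true rfl ?_
    intro j hij hjv
    exact absurd (le_trans (by nlinarith) hjv) h

theorem divisor_transfer (v : Int) (hv : 3 ≤ v) :
    (∃ i, i ∈ PySem.List.pyRange 2 (PySem.Int.floordiv v 2 + 1) 1 ∧ PySem.Int.mod v i = 0)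
    ↔ (∃ j, 2 ≤ j ∧ j * j ≤ v ∧ PySem.Int.mod v j = 0) := by
  constructor
  · rintro ⟨i, hmem, hmod⟩
    rw [PySem.List.mem_pyRange_one] at hmem
    obtain ⟨h2i, hiu⟩ := hmem
    have hile : i * 2 ≤ v := by
      rw [← PySem.Int.le_floordiv_iff_mul_le (by norm_num)]; omega
    rw [PySem.Int.mod_eq_zero_iff_dvd] at hmod
    obtain ⟨c, hc⟩ := hmod
    have hc2 : 2 ≤ c := by nlinarith
    by_cases hii : i * i ≤ v
    · exact ⟨i, h2i, hii, (PySem.Int.mod_eq_zero_iff_dvd v i).mpr ⟨c, hc⟩⟩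
    · exact ⟨c, hc2, by nlinarith, (PySem.Int.mod_eq_zero_iff_dvd v c).mpr ⟨i, by rw [hc]; ring⟩⟩
  · rintro ⟨j, h2j, hjj, hmod⟩
    refine ⟨j, ?_, hmod⟩
    rw [PySem.List.mem_pyRange_one]
    have : j ≤ PySem.Int.floordiv v 2 := by
      rw [PySem.Int.le_floordiv_iff_mul_le (by norm_num)]; nlinarith
    omega

theorem passes_eq_is_prime (v : Int) : is_prime v = pvPasses v := by
  unfold is_prime pvPasses
  by_cases h1 : v = 1
  · simp [h1]
  by_cases h2 : v = 2
  · subst h2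
    rw [show pvTrial 2 2 = true from by rw [pvTrial]; norm_num]
    decide
  by_cases h0 : v < 2
  · have hr : PySem.List.pyRange 2 (PySem.Int.floordiv v 2 + 1) 1 = [] := by
      apply PySem.List.pyRange_one_eq_nil
      have : ¬ (1 ≤ PySem.Int.floordiv v 2) := by
        rw [PySem.Int.le_floordiv_iff_mul_le (by norm_num)]; omega
      omega
    have ht : pvTrial v 2 = true := by
      rw [pvTrial, dif_neg (by omega)]
    rw [hr, ht]
    simp [h1, h2]
  · have hv : 3 ≤ v := by omega
    simp only [beq_iff_eq, h1, h2, if_false]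
    rw [Bool.eq_iff_iff]
    constructor
    · intro hA
      rw [pvTrial_eq_true_iff v 2 (by norm_num)]
      intro j h2j hjv hmod
      obtain ⟨i, hi, him⟩ := (divisor_transfer v hv).mpr ⟨j, h2j, hjv, hmod⟩
      have hany : (PySem.List.pyRange 2 (PySem.Int.floordiv v 2 + 1) 1).any
          (fun i => PySem.Int.mod v i == 0) = true := by
        rw [List.any_eq_true]; exact ⟨i, hi, by simpa using him⟩
      rw [if_pos hany] at hA
      exact absurd hA (by simp)
    · intro hB
      rw [pvTrial_eq_true_iff v 2 (by norm_num)] at hB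
      rw [if_neg]
      intro hany
      rw [List.any_eq_true] at hany
      obtain ⟨i, hi, him⟩ := hany
      obtain ⟨j, h2j, hjj, hmod⟩ := (divisor_transfer v hv).mp ⟨i, hi, by simpa using him⟩
      exact hB j h2j hjj hmod

theorem contains_ofList (g : List Int) (m : Int) :
    PySem.Set.contains (PySem.Set.ofList g) m = g.contains m := by
  rw [Bool.eq_iff_iff, PySem.Set.contains_iff, PySem.Set.mem_ofList, List.contains_iff_mem]

theorem inner_eq (g : List Int) (n num : Int) (ks : List Int) :
    pickA_inner g n num ks = pickB_inner (PySem.Set.ofList g) n num ks := by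
  induction ks with
  | nil => rfl
  | cons k ks ih =>
    simp only [pickA_inner, pickB_inner, contains_ofList, ih]

theorem outer_eq (g : List Int) (n : Int) (xs : List Int) :
    pickA_outer g n xs = pickB_scan (PySem.Set.ofList g) n xs := by
  induction xs with
  | nil => rfl
  | cons x xs ih =>
    simp only [pickA_outer, pickB_scan, passes_eq_is_prime, inner_eq, ih]

-- ===== VERDICT (by name: the statement is the Claim_ definition above) =====
theorem pick_num_spec : Claim_equal_pick_num := by
  intro game_num n _
  unfold Spec_pick_num pick_num pick_num_alt
  exact outer_eq game_num n game_num
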